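-- pv_equiv track=rewrite | github.com/MrBrantCode/unitest_baseline | mut_generate/mist_train_cf/cf_58136/solution.py | rolling_max_min
-- ===== SOURCE A (Python) =====
-- from typing import List, Tuple
--
-- def rolling_max_min(numbers: List[int]) -> List[Tuple[int, int]]:
--     if len(numbers) == 0:
--         return []
--     numbers = list(filter(lambda x: x >= 0, numbers))
--     if len(numbers) == 0:
--         return []
--     min_val = numbers[0]
--     max_val = numbers[0]
--     old_max, old_min = max_val, min_val
--     ans = [(max_val, min_val)]
--     for i in range(1, len(numbers)):
--         if numbers[i] < min_val:
--             min_val = numbers[i]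
--         if numbers[i] > max_val:
--             max_val = numbers[i]
--         if old_min != min_val or old_max != max_val:
--             ans.append((max_val, min_val))
--             old_max, old_min = max_val, min_val
--     return ans
-- ===== SOURCE B (Python) =====
-- from typing import List, Tuple
--
-- def _scan(f, xs):
--     it = iter(xs)
--     acc = next(it)
--     out = [acc]
--     for x in it:
--         acc = f(acc, x)
--         out.append(acc)
--     return out
--
-- def rolling_max_min(numbers: List[int]) -> List[Tuple[int, int]]:
--     nn = [x for x in numbers if x >= 0]
--     if not nn:
--         return []
--     pairs = list(zip(_scan(max, nn), _scan(min, nn)))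
--     out, prev = [pairs[0]], pairs[0]
--     for q in pairs[1:]:
--         if q != prev:
--             out.append(q)
--             prev = q
--     return out
-- ===== Notes on version B (the rewrite author's own statement) =====
-- stated objective: alternative
-- what changed: A fuses filtering, running-extrema tracking and change-detection into one stateful loop with old_max/old_min bookkeeping; B first builds full running-maximum and running-minimum tables with a generic scan, zips them into (max,min) pairs, and then collapses consecutive duplicate pairs in a separate pass.
import Mathlib
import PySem

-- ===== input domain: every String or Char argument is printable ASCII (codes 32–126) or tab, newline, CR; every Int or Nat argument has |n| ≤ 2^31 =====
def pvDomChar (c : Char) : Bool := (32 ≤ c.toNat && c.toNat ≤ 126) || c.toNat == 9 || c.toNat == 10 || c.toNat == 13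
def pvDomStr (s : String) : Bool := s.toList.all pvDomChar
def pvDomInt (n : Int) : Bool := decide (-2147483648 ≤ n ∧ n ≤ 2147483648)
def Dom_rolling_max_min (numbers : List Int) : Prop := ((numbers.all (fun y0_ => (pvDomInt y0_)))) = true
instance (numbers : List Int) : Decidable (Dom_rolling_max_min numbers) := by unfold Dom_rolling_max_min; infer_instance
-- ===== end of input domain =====

-- B replaces A's single stateful loop (running extrema + old_max/old_min change guard) by two
-- scan tables (running max, running min) zipped into pairs and a separate duplicate-collapse
-- pass; objective: alternative decomposition, same cost.


-- ===== PORT A =====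
-- loop body of A's `for i in range(1, len(numbers))`, state (min_val, max_val, old_max, old_min, ans)
def pvStepA (s : Int × Int × Int × Int × List (Int × Int)) (x : Int) : Int × Int × Int × Int × List (Int × Int) :=
  let min_val := if x < s.1 then x else s.1
  let max_val := if x > s.2.1 then x else s.2.1
  if s.2.2.2.1 ≠ min_val ∨ s.2.2.1 ≠ max_val then
    (min_val, max_val, max_val, min_val, s.2.2.2.2 ++ [(max_val, min_val)])
  else
    (min_val, max_val, s.2.2.1, s.2.2.2.1, s.2.2.2.2)

def rolling_max_min (numbers : List Int) : List (Int × Int) :=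
  if numbers.length = 0 then []
  else
    match numbers.filter (fun x => x ≥ 0) with
    | [] => []
    | h :: t => (List.foldl pvStepA (h, h, h, h, [(h, h)]) t).2.2.2.2

-- ===== PORT B =====
-- port of Source B's `_scan(f, nn)` (nn nonempty at both call sites; [] case is `next` raising, unreached)
def pvScan (f : Int → Int → Int) : List Int → List Int
  | [] => []
  | h :: t => List.scanl f h t

-- loop body of B's collapse pass, state (out, prev)
def pvStepB (s : List (Int × Int) × (Int × Int)) (q : Int × Int) : List (Int × Int) × (Int × Int) :=
  if q ≠ s.2 then (s.1 ++ [q], q) else s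

def rolling_max_min_alt (numbers : List Int) : List (Int × Int) :=
  let nn := numbers.filter (fun x => x ≥ 0)
  match (pvScan (fun a b => max a b) nn).zip (pvScan (fun a b => min a b) nn) with
  | [] => []
  | p0 :: rest => (List.foldl pvStepB ([p0], p0) rest).1

-- ===== PRECONDITION & SPEC =====
def Spec_rolling_max_min (numbers : List Int) (out : List (Int × Int)) : Prop := out = rolling_max_min_alt numbers
instance (numbers : List Int) (out : List (Int × Int)) : Decidable (Spec_rolling_max_min numbers out) := by unfold Spec_rolling_max_min; infer_instance

-- ===== CLAIM (what is proved, stated in full; the proofs are below) =====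
def Claim_equal_rolling_max_min : Prop := ∀ (numbers : List Int), Dom_rolling_max_min numbers → Spec_rolling_max_min numbers (rolling_max_min numbers)

-- ===== LEMMAS AND PROOFS =====

theorem pv_zip_scanl (f g : Int → Int → Int) (b c : Int) (l : List Int) :
    (List.scanl f b l).zip (List.scanl g c l) =
      (b, c) :: (match l with
        | [] => []
        | x :: l' => (List.scanl f (f b x) l').zip (List.scanl g (g c x) l')) := by
  cases l <;> simp [List.scanl_nil, List.scanl_cons]

theorem pv_fold_AB (t : List Int) : ∀ (M m : Int) (ans : List (Int × Int)),
    (List.foldl pvStepA (m, M, M, m, ans) t).2.2.2.2 =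
      (List.foldl pvStepB (ans, (M, m))
        (((List.scanl (fun a b => max a b) M t).zip (List.scanl (fun a b => min a b) m t)).tail)).1 := by
  induction t with
  | nil => intro M m ans; simp [List.scanl_nil]
  | cons x t' ih =>
    intro M m ans
    have hmin : (if x < m then x else m) = min m x := by rw [min_def]; split_ifs <;> omega
    have hmax : (if x > M then x else M) = max M x := by rw [max_def]; split_ifs <;> omega
    rw [List.scanl_cons, List.scanl_cons, List.zip_cons_cons, List.tail_cons,
      pv_zip_scanl (fun a b => max a b) (fun a b => min a b) (max M x) (min m x) t']
    by_cases hc : max M x = M ∧ min m x = m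
    · have hA : pvStepA (m, M, M, m, ans) x = (m, M, M, m, ans) := by
        simp [pvStepA, hmin, hmax, hc.1, hc.2]
      have hB : pvStepB (ans, (M, m)) (max M x, min m x) = (ans, (M, m)) := by
        simp [pvStepB, hc.1, hc.2]
      rw [List.foldl_cons, List.foldl_cons, hA, hB, ih M m ans,
        pv_zip_scanl (fun a b => max a b) (fun a b => min a b) M m t']
      cases t' <;> simp_all
    · have hA : pvStepA (m, M, M, m, ans) x =
          (min m x, max M x, max M x, min m x, ans ++ [(max M x, min m x)]) := by
        simp only [pvStepA, hmin, hmax]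
        rw [if_pos]
        by_contra hcon
        push_neg at hcon
        exact hc ⟨hcon.2.symm, hcon.1.symm⟩
      have hB : pvStepB (ans, (M, m)) (max M x, min m x) =
          (ans ++ [(max M x, min m x)], (max M x, min m x)) := by
        have : (max M x, min m x) ≠ (M, m) := by
          intro hq; exact hc ⟨congrArg Prod.fst hq, congrArg Prod.snd hq⟩
        simp [pvStepB, this]
      rw [List.foldl_cons, List.foldl_cons, hA, hB,
        ih (max M x) (min m x) (ans ++ [(max M x, min m x)]),
        pv_zip_scanl (fun a b => max a b) (fun a b => min a b) (max M x) (min m x) t',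
        List.tail_cons]

-- ===== VERDICT (by name: the statement is the Claim_ definition above) =====
theorem rolling_max_min_spec : Claim_equal_rolling_max_min := by
  intro numbers _
  unfold Spec_rolling_max_min rolling_max_min rolling_max_min_alt
  cases hn : numbers with
  | nil => simp [pvScan]
  | cons y ys =>
    simp only [List.length_cons, Nat.succ_ne_zero, if_false]
    cases hf : (y :: ys).filter (fun x => x ≥ 0) with
    | nil => simp [pvScan]
    | cons h t =>
      simp only [pvScan,
        pv_zip_scanl (fun a b => max a b) (fun a b => min a b) h h t]
      have := pv_fold_AB t h h [(h, h)]
      rw [pv_zip_scanl (fun a b => max a b) (fun a b => min a b) h h t] at this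
      cases t with
      | nil => simp
      | cons x t' => simpa using this
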